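-- pv_equiv track=rewrite | github.com/i-hyejin/Algorithm | Baekjoon/1107_remote.py | solution
-- ===== SOURCE A (Python) =====
-- def solution(n, m, broken_button):
--     now_ch = 100                                                                # 현재 채널
--     answer = abs(now_ch - n)                                                    # 버튼을 누른 횟수. 초기화는 현재 채널-목표 채널
--
--     for ch in range(1000000):                                                   # 100 -> 500000 or 999999 -> 500000
--         str_ch = str(ch)                                                        # 문자열 변환
--
--         for i in range(len(str_ch)):
--             if int(str_ch[i]) in broken_button:                                 # str_ch 버튼이 broken_button에 있으면
--                 break                                                           # 계산할 필요 없음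
--             elif i == len(str_ch) - 1:                                          # str_ch 마지막 숫자이면(str 버튼이 broken_button에 없으면)
--                 answer = min(answer, abs(int(str_ch)-n)+len(str_ch))            # answer과 str_ch-n만큼 +- 버튼을 누른 후 str_ch 만큼 버튼을 누른 것 중 최소값
--
--     return answer
-- ===== SOURCE B (Python) =====
-- def solution(n, m, broken_button):
--     # Enumerate exactly the typeable channel strings (built digit by digit,
--     # no leading zeros) instead of scanning all 1,000,000 channels.
--     broken = set(broken_button)
--     allowed = [str(d) for d in range(10) if d not in broken]
--     best = abs(100 - n)
--     for s in allowed:                      # 1-digit candidates (includes '0')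
--         best = min(best, abs(int(s) - n) + len(s))
--     prefixes = [s for s in allowed if s != '0']
--     for _length in range(2, 7):
--         nxt = [p + c for p in prefixes for c in allowed]
--         for s in nxt:
--             best = min(best, abs(int(s) - n) + len(s))
--         prefixes = nxt
--     return best
-- ===== Notes on version B (the rewrite author's own statement) =====
-- stated objective: faster
-- what changed: Instead of scanning all 1,000,000 channels and checking every digit of each against the broken list, B generates exactly the typeable channel strings digit by digit (length 1..6, no leading zeros) from the non-broken digits and takes the minimum cost over those candidates.
import Mathlib
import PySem

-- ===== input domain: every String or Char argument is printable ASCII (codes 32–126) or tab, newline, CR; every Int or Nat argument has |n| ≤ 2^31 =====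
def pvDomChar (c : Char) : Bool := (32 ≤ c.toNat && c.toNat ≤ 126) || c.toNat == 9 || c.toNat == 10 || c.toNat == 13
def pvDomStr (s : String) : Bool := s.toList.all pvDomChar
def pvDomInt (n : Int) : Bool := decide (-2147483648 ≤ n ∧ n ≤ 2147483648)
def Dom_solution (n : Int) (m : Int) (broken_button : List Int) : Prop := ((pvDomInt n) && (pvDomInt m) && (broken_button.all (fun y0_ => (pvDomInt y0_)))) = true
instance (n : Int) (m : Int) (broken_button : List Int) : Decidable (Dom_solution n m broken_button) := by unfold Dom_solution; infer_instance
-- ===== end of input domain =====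

-- B enumerates only the typeable channel strings, built digit by digit, instead of
-- scanning all 1,000,000 channels and parsing each one (objective: faster).

-- int(s): exact hand port of Python int(s) for the strings parsed here, which are
-- always nonempty and consist only of digits '0'..'9' (they come from str(ch) for
-- ch in range(1000000) resp. are built from such digit characters)
def intOfDigits (cs : List Char) : Int :=
  cs.foldl (fun a c => 10 * a + ((c.toNat : Int) - 48)) 0

-- ===== PORT A =====
-- inner 'for i in range(len(str_ch))' loop with its break: structural recursion over
-- the remaining characters str_ch[i:], carrying the index i ('i == len(str_ch)-1' kept)
def solnInner (broken_button : List Int) (n : Int) (str_ch : List Char) :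
    List Char → Int → Int → Int
  | [], _i, ans => ans
  | c :: rest, i, ans =>
    -- int(str_ch[i]) in broken_button
    if broken_button.contains (intOfDigits [c]) then
      ans            -- break
    else if i == (str_ch.length : Int) - 1 then
      solnInner broken_button n str_ch rest (i + 1)
        (min ans (|intOfDigits str_ch - n| + (str_ch.length : Int)))
    else
      solnInner broken_button n str_ch rest (i + 1) ans

def solution (n : Int) (m : Int) (broken_button : List Int) : Int :=
  let now_ch : Int := 100
  let answer : Int := |now_ch - n|
  (PySem.List.pyRange 0 1000000).foldl
    (fun answer ch =>
      let str_ch := PySem.Int.toChars ch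
      solnInner broken_button n str_ch str_ch 0 answer)
    answer

-- ===== PORT B =====
def solution_alt (n : Int) (m : Int) (broken_button : List Int) : Int :=
  let broken := PySem.Set.ofList broken_button
  let allowed := ((PySem.List.pyRange 0 10).filter (fun d => !(broken.contains d))).map
    (fun d => PySem.Int.toChars d)
  let best : Int := |100 - n|
  let best := allowed.foldl
    (fun best s => min best (|intOfDigits s - n| + (s.length : Int))) best
  let prefixes := allowed.filter (fun s => !(s == ['0']))
  let res := (PySem.List.pyRange 2 7).foldl
    (fun (st : List (List Char) × Int) _length =>
      let nxt := st.1.flatMap (fun p => allowed.map (fun c => p ++ c))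
      let best := nxt.foldl
        (fun best s => min best (|intOfDigits s - n| + (s.length : Int))) st.2
      (nxt, best))
    (prefixes, best)
  res.2

-- ===== PRECONDITION & SPEC =====
def Spec_solution (n : Int) (m : Int) (broken_button : List Int) (out : Int) : Prop := out = solution_alt n m broken_button
instance (n : Int) (m : Int) (broken_button : List Int) (out : Int) : Decidable (Spec_solution n m broken_button out) := by unfold Spec_solution; infer_instance

-- ===== CLAIM (what is proved, stated in full; the proofs are below) =====
def Claim_equal_solution : Prop := ∀ (n : Int) (m : Int) (broken_button : List Int), Dom_solution n m broken_button → Spec_solution n m broken_button (solution n m broken_button)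

-- ===== LEMMAS AND PROOFS =====

-- proof-side abbreviations
def gcost (n : Int) (cs : List Char) : Int :=
  |intOfDigits cs - n| + (cs.length : Int)

def chk (bb : List Int) (c : Char) : Bool :=
  !(bb.contains (intOfDigits [c]))

def pressN (bb : List Int) (ch : Nat) : Bool := (Nat.toDigits 10 ch).all (chk bb)

def okD (bb : List Int) (d : Nat) : Bool := !(bb.contains (d : Int))

def allowedN (bb : List Int) : List Nat := (List.range 10).filter (okD bb)

def Fn (n : Int) (l : List Nat) (a : Int) : Int :=
  l.foldl (fun a ch => min a (gcost n (Nat.toDigits 10 ch))) a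

def Fs (n : Int) (l : List (List Char)) (a : Int) : Int :=
  l.foldl (fun a s => min a (gcost n s)) a

lemma digit_val (d : Nat) (hd : d < 10) :
    intOfDigits [Nat.digitChar d] = (d : Int) := by
  interval_cases d <;> rfl

lemma chk_digitChar (bb : List Int) (d : Nat) (hd : d < 10) :
    chk bb (Nat.digitChar d) = okD bb d := by
  simp [chk, okD, digit_val d hd]

lemma toDigits_step (p d : Nat) (hp : 1 ≤ p) (hd : d < 10) :
    Nat.toDigits 10 (10 * p + d) = Nat.toDigits 10 p ++ [Nat.digitChar d] := by
  have h := Nat.toDigits_append_toDigits (b := 10) (n := p) (d := d) (by norm_num) hp hd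
  rw [← h, Nat.toDigits_of_lt_base hd]

lemma pressN_lt (bb : List Int) (d : Nat) (hd : d < 10) :
    pressN bb d = okD bb d := by
  simp [pressN, Nat.toDigits_of_lt_base hd, chk_digitChar bb d hd]

lemma pressN_step (bb : List Int) (p d : Nat) (hp : 1 ≤ p) (hd : d < 10) :
    pressN bb (10 * p + d) = (pressN bb p && okD bb d) := by
  simp [pressN, toDigits_step p d hp hd, List.all_append, chk_digitChar bb d hd]

lemma chunk_filter (bb : List Int) (a : Nat) (ha : 1 ≤ a) :
    (List.range' (10 * a) 10).filter (pressN bb) =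
      if pressN bb a then (allowedN bb).map (fun d => 10 * a + d) else [] := by
  rw [List.range'_eq_map_range, List.filter_map]
  have hc : ∀ d ∈ List.range 10,
      (pressN bb ∘ (fun x => 10 * a + x)) d = (pressN bb a && okD bb d) := by
    intro d hd
    simpa using pressN_step bb a d ha (List.mem_range.mp hd)
  rw [List.filter_congr hc]
  by_cases hp : pressN bb a
  · simp [hp, allowedN]
  · simp [hp]

lemma rangeMul (bb : List Int) :
    ∀ (k a : Nat), 1 ≤ a →
      (List.range' (10 * a) (10 * k)).filter (pressN bb) =
        ((List.range' a k).filter (pressN bb)).flatMap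
          (fun p => (allowedN bb).map (fun d => 10 * p + d)) := by
  intro k
  induction k with
  | zero => simp
  | succ k ih =>
    intro a ha
    have hsplit : List.range' (10 * a) (10 * (k + 1)) =
        List.range' (10 * a) 10 ++ List.range' (10 * (a + 1)) (10 * k) := by
      have h1 : 10 * (k + 1) = 10 + 10 * k := by ring
      have h2 : 10 * (a + 1) = 10 * a + 1 * 10 := by ring
      rw [h1, h2, List.range'_append]
    rw [hsplit, List.filter_append, chunk_filter bb a ha,
        show List.range' a (k + 1) = a :: List.range' (a + 1) k from List.range'_succ,
        List.filter_cons, ih (a + 1) (by omega)]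
    by_cases hp : pressN bb a <;> simp [hp]

-- A's inner loop over the remaining characters str_ch[k:]
lemma solnInner_spec (bb : List Int) (n : Int) (cs : List Char) :
    ∀ (suf : List Char) (k : Nat) (ans : Int), suf ≠ [] → cs.length = k + suf.length →
      solnInner bb n cs suf (k : Int) ans =
        if suf.all (chk bb) then min ans (gcost n cs) else ans := by
  intro suf
  induction suf with
  | nil => intro k ans h _; exact absurd rfl h
  | cons c rest ih =>
    intro k ans _ hlen
    rw [solnInner, List.all_cons]
    by_cases hc : chk bb c
    · have hbr : bb.contains (intOfDigits [c]) = false := by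
        have := hc; unfold chk at this; simpa using this
      rw [if_neg (by rw [hbr]; simp), hc, Bool.true_and]
      cases rest with
      | nil =>
        have hlast : ((k : Int) == (cs.length : Int) - 1) = true := by
          simp only [beq_iff_eq, List.length_cons, List.length_nil] at hlen ⊢; omega
        rw [if_pos (by simpa using hlast), solnInner]
        simp [gcost]
      | cons c2 rest2 =>
        have hnl : ((k : Int) == (cs.length : Int) - 1) = false := by
          simp only [beq_eq_false_iff_ne, ne_eq, List.length_cons] at hlen ⊢
          intro h; omega
        rw [if_neg (by simp [hnl]),
            show ((k : Int) + 1) = (((k + 1 : Nat)) : Int) by push_cast; ring,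
            ih (k + 1) ans (by simp) (by simp [List.length_cons] at hlen ⊢; omega)]
    · have hcf : chk bb c = false := by simpa using hc
      have hbr : bb.contains (intOfDigits [c]) = true := by
        unfold chk at hcf; simpa using hcf
      rw [if_pos hbr, hcf, Bool.false_and, if_neg (by simp)]

lemma toChars_natCast (k : Nat) : PySem.Int.toChars (k : Int) = Nat.toDigits 10 k := by
  simp [PySem.Int.toChars]

lemma stepA (bb : List Int) (n : Int) (ans : Int) (ch : Nat) :
    solnInner bb n (PySem.Int.toChars (ch : Int)) (PySem.Int.toChars (ch : Int)) 0 ans =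
      if pressN bb ch then min ans (gcost n (Nat.toDigits 10 ch)) else ans := by
  rw [toChars_natCast]
  have hlen : 0 < (Nat.toDigits 10 ch).length := Nat.length_toDigits_pos
  have h0 : ((0 : Int)) = (((0 : Nat)) : Int) := by norm_num
  rw [h0, solnInner_spec bb n (Nat.toDigits 10 ch) (Nat.toDigits 10 ch) 0 ans
        (by intro h; rw [h] at hlen; simp at hlen) (by simp)]
  rfl

lemma A_eq (n m : Int) (bb : List Int) :
    solution n m bb = Fn n ((List.range 1000000).filter (pressN bb)) (|100 - n|) := by
  unfold solution
  rw [show ((1000000 : Int)) = (((1000000 : Nat)) : Int) by norm_num,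
      PySem.List.pyRange_zero_natCast, List.foldl_map]
  have hfun : (fun (answer : Int) (k : Nat) =>
        solnInner bb n (PySem.Int.toChars (k : Int)) (PySem.Int.toChars (k : Int)) 0 answer) =
      (fun (answer : Int) (k : Nat) =>
        if pressN bb k then min answer (gcost n (Nat.toDigits 10 k)) else answer) := by
    funext a k; exact stepA bb n a k
  show List.foldl _ _ _ = _
  rw [hfun, Fn, List.foldl_filter]

lemma range_split : List.range 1000000 =
    ((((List.range' 0 10 ++ List.range' 10 90) ++ List.range' 100 900) ++
        List.range' 1000 9000) ++ List.range' 10000 90000) ++ List.range' 100000 900000 := by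
  rw [List.range_eq_range']
  rw [show List.range' 0 10 ++ List.range' 10 90 = List.range' 0 100 from by
        simpa using List.range'_append (s := 0) (m := 10) (n := 90) (step := 1)]
  rw [show List.range' 0 100 ++ List.range' 100 900 = List.range' 0 1000 from by
        simpa using List.range'_append (s := 0) (m := 100) (n := 900) (step := 1)]
  rw [show List.range' 0 1000 ++ List.range' 1000 9000 = List.range' 0 10000 from by
        simpa using List.range'_append (s := 0) (m := 1000) (n := 9000) (step := 1)]
  rw [show List.range' 0 10000 ++ List.range' 10000 90000 = List.range' 0 100000 from by
        simpa using List.range'_append (s := 0) (m := 10000) (n := 90000) (step := 1)]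
  rw [show List.range' 0 100000 ++ List.range' 100000 900000 = List.range' 0 1000000 from by
        simpa using List.range'_append (s := 0) (m := 100000) (n := 900000) (step := 1)]

-- ===== B-side =====

lemma set_contains (bb : List Int) (d : Int) :
    (PySem.Set.ofList bb).contains d = bb.contains d := by
  by_cases h : d ∈ bb
  · simp [h, (PySem.Set.mem_ofList bb d).mpr h]
  · have : ¬ d ∈ PySem.Set.ofList bb := fun hc => h ((PySem.Set.mem_ofList bb d).mp hc)
    simp [h, this]

lemma allowed_eq (bb : List Int) :
    ((PySem.List.pyRange 0 10).filter (fun d => !((PySem.Set.ofList bb).contains d))).map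
        (fun d => PySem.Int.toChars d) =
      (allowedN bb).map (fun d => Nat.toDigits 10 d) := by
  rw [show ((10 : Int)) = (((10 : Nat)) : Int) by norm_num,
      PySem.List.pyRange_zero_natCast, List.filter_map, List.map_map]
  have h1 : ((fun d => !((PySem.Set.ofList bb).contains d)) ∘ (fun (k : Nat) => (k : Int))) =
      okD bb := by
    funext k; simp only [Function.comp_apply, set_contains]; rfl
  rw [h1]
  have h2 : ((fun d => PySem.Int.toChars d) ∘ (fun (k : Nat) => (k : Int))) =
      (fun k => Nat.toDigits 10 k) := by
    funext k; exact toChars_natCast k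
  rw [h2]; rfl

lemma Fs_map (n : Int) (l : List Nat) (a : Int) :
    Fs n (l.map (fun d => Nat.toDigits 10 d)) a = Fn n l a := by
  rw [Fs, Fn, List.foldl_map]

lemma lvl1_eq (bb : List Int) :
    (List.range' 0 10).filter (pressN bb) = allowedN bb := by
  have h : List.range' 0 10 = List.range 10 := by rw [List.range_eq_range']
  rw [h, allowedN]
  exact List.filter_congr (fun d hd => pressN_lt bb d (List.mem_range.mp hd))

lemma prefixes_eq (bb : List Int) :
    ((allowedN bb).map (fun d => Nat.toDigits 10 d)).filter (fun s => !(s == ['0'])) =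
      ((List.range' 1 9).filter (pressN bb)).map (fun d => Nat.toDigits 10 d) := by
  rw [List.filter_map]
  have h1 : ∀ d ∈ allowedN bb,
      ((fun s => !(s == ['0'])) ∘ (fun d => Nat.toDigits 10 d)) d = !(d == 0) := by
    intro d hd
    have hd10 : d < 10 := List.mem_range.mp (List.mem_of_mem_filter hd)
    interval_cases d <;> rfl
  rw [List.filter_congr h1]
  congr 1
  -- (allowedN bb).filter (fun d => !(d == 0)) = (range' 1 9).filter (pressN bb)
  rw [allowedN, List.filter_filter]
  rw [show List.range 10 = 0 :: List.range' 1 9 from by rw [List.range_eq_range']; rfl]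
  rw [List.filter_cons]
  rw [if_neg (by simp)]
  have h2 : ∀ d ∈ List.range' 1 9, (!(d == 0) && okD bb d) = pressN bb d := by
    intro d hd
    have h1d := List.mem_range'_1.mp hd
    have hd0 : (d == 0) = false := by simp; omega
    rw [hd0, pressN_lt bb d (by omega)]
    simp
  rw [List.filter_congr h2]

-- one generation level, numerically
def Elvl (bb : List Int) (P : List Nat) : List Nat :=
  P.flatMap (fun p => (allowedN bb).map (fun d => 10 * p + d))

lemma flatMap_level (bb : List Int) (P : List Nat) (hP : ∀ p ∈ P, 1 ≤ p) :
    (P.map (fun p => Nat.toDigits 10 p)).flatMap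
        (fun p => ((allowedN bb).map (fun d => Nat.toDigits 10 d)).map (fun c => p ++ c)) =
      (Elvl bb P).map (fun d => Nat.toDigits 10 d) := by
  rw [Elvl, List.flatMap_map, List.map_flatMap]
  apply List.flatMap_congr
  intro p hp
  rw [List.map_map, List.map_map]
  apply List.map_congr_left
  intro d hd
  have hd10 : d < 10 := List.mem_range.mp (List.mem_of_mem_filter hd)
  simp only [Function.comp_apply]
  rw [toDigits_step p d (hP p hp) hd10, Nat.toDigits_of_lt_base hd10]

-- B's level loop body, with the allowed-strings list already in its numeric form
def fB (bb : List Int) (n : Int) : List (List Char) × Int → Int → List (List Char) × Int :=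
  fun st _length =>
    let nxt := st.1.flatMap
      (fun p => ((allowedN bb).map (fun d => Nat.toDigits 10 d)).map (fun c => p ++ c))
    let best := nxt.foldl
      (fun best s => min best (|intOfDigits s - n| + (s.length : Int))) st.2
    (nxt, best)

def iterP (bb : List Int) : List Nat → Nat → List Nat
  | P, 0 => P
  | P, k + 1 => iterP bb (Elvl bb P) k

def iterFn (bb : List Int) (n : Int) : List Nat → Int → Nat → Int
  | _, b, 0 => b
  | P, b, k + 1 => iterFn bb n (Elvl bb P) (Fn n (Elvl bb P) b) k

lemma fB_step (bb : List Int) (n : Int) (P : List Nat) (b : Int) (len : Int)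
    (hP : ∀ p ∈ P, 1 ≤ p) :
    fB bb n (P.map (fun d => Nat.toDigits 10 d), b) len =
      ((Elvl bb P).map (fun d => Nat.toDigits 10 d), Fn n (Elvl bb P) b) := by
  simp only [fB]
  rw [flatMap_level bb P hP, ← Fs_map n (Elvl bb P) b]
  rfl

lemma fold_stepsB (bb : List Int) (n : Int) :
    ∀ (lens : List Int) (P : List Nat) (b : Int), (∀ p ∈ P, 1 ≤ p) →
      List.foldl (fB bb n) (P.map (fun d => Nat.toDigits 10 d), b) lens =
        ((iterP bb P lens.length).map (fun d => Nat.toDigits 10 d),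
          iterFn bb n P b lens.length) := by
  intro lens
  induction lens with
  | nil => intro P b hP; simp [iterP, iterFn]
  | cons l ls ih =>
    intro P b hP
    rw [List.foldl_cons, fB_step bb n P b l hP]
    rw [ih (Elvl bb P) (Fn n (Elvl bb P) b) (fun q hq => by
      rcases List.mem_flatMap.mp hq with ⟨p, hp, hq2⟩
      rcases List.mem_map.mp hq2 with ⟨d, _, rfl⟩
      have := hP p hp; omega)]
    rfl

lemma E_filter (bb : List Int) (a k : Nat) (ha : 1 ≤ a) :
    Elvl bb ((List.range' a k).filter (pressN bb)) =
      (List.range' (10 * a) (10 * k)).filter (pressN bb) := by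
  rw [Elvl]
  exact (rangeMul bb k a ha).symm

lemma filter_range'_pos (bb : List Int) (a k : Nat) (ha : 1 ≤ a) :
    ∀ p ∈ (List.range' a k).filter (pressN bb), 1 ≤ p := by
  intro p hp
  have := List.mem_range'_1.mp (List.mem_of_mem_filter hp)
  omega

lemma Fn_append (n : Int) (l1 l2 : List Nat) (a : Int) :
    Fn n (l1 ++ l2) a = Fn n l2 (Fn n l1 a) := by
  simp [Fn, List.foldl_append]

lemma iterFn_five (bb : List Int) (n : Int) (b : Int) :
    iterFn bb n ((List.range' 1 9).filter (pressN bb)) b 5 =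
      Fn n ((List.range' 100000 900000).filter (pressN bb))
        (Fn n ((List.range' 10000 90000).filter (pressN bb))
          (Fn n ((List.range' 1000 9000).filter (pressN bb))
            (Fn n ((List.range' 100 900).filter (pressN bb))
              (Fn n ((List.range' 10 90).filter (pressN bb)) b)))) := by
  have e1 : Elvl bb ((List.range' 1 9).filter (pressN bb)) =
      (List.range' 10 90).filter (pressN bb) := by
    have h := E_filter bb 1 9 (by norm_num); norm_num at h; exact h
  have e2 : Elvl bb ((List.range' 10 90).filter (pressN bb)) =
      (List.range' 100 900).filter (pressN bb) := by
    have h := E_filter bb 10 90 (by norm_num); norm_num at h; exact h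
  have e3 : Elvl bb ((List.range' 100 900).filter (pressN bb)) =
      (List.range' 1000 9000).filter (pressN bb) := by
    have h := E_filter bb 100 900 (by norm_num); norm_num at h; exact h
  have e4 : Elvl bb ((List.range' 1000 9000).filter (pressN bb)) =
      (List.range' 10000 90000).filter (pressN bb) := by
    have h := E_filter bb 1000 9000 (by norm_num); norm_num at h; exact h
  have e5 : Elvl bb ((List.range' 10000 90000).filter (pressN bb)) =
      (List.range' 100000 900000).filter (pressN bb) := by
    have h := E_filter bb 10000 90000 (by norm_num); norm_num at h; exact h
  show iterFn bb n _ b (4 + 1) = _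
  rw [iterFn, e1]
  show iterFn bb n _ _ (3 + 1) = _
  rw [iterFn, e2]
  show iterFn bb n _ _ (2 + 1) = _
  rw [iterFn, e3]
  show iterFn bb n _ _ (1 + 1) = _
  rw [iterFn, e4]
  show iterFn bb n _ _ (0 + 1) = _
  rw [iterFn, e5]
  rfl

lemma B_eq (n m : Int) (bb : List Int) :
    solution_alt n m bb =
      Fn n ((List.range' 100000 900000).filter (pressN bb))
        (Fn n ((List.range' 10000 90000).filter (pressN bb))
          (Fn n ((List.range' 1000 9000).filter (pressN bb))
            (Fn n ((List.range' 100 900).filter (pressN bb))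
              (Fn n ((List.range' 10 90).filter (pressN bb))
                (Fn n (allowedN bb) (|100 - n|)))))) := by
  simp only [solution_alt]
  rw [allowed_eq bb, prefixes_eq bb]
  have hb : (((allowedN bb).map (fun d => Nat.toDigits 10 d)).foldl
      (fun best s => min best (|intOfDigits s - n| + (s.length : Int)))
      (|100 - n|)) = Fn n (allowedN bb) (|100 - n|) := by
    rw [← Fs_map n (allowedN bb) (|100 - n|)]
    rfl
  rw [hb, show PySem.List.pyRange 2 7 = [(2 : Int), 3, 4, 5, 6] from rfl]
  refine Eq.trans (congrArg Prod.snd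
    (fold_stepsB bb n [(2 : Int), 3, 4, 5, 6] ((List.range' 1 9).filter (pressN bb))
      (Fn n (allowedN bb) (|100 - n|)) (filter_range'_pos bb 1 9 (by norm_num)))) ?_
  exact iterFn_five bb n (Fn n (allowedN bb) (|100 - n|))

lemma A_split (n m : Int) (bb : List Int) :
    solution n m bb =
      Fn n ((List.range' 100000 900000).filter (pressN bb))
        (Fn n ((List.range' 10000 90000).filter (pressN bb))
          (Fn n ((List.range' 1000 9000).filter (pressN bb))
            (Fn n ((List.range' 100 900).filter (pressN bb))
              (Fn n ((List.range' 10 90).filter (pressN bb))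
                (Fn n (allowedN bb) (|100 - n|)))))) := by
  rw [A_eq n m bb, range_split]
  simp only [List.filter_append, Fn_append]
  rw [lvl1_eq]

-- ===== VERDICT (by name: the statement is the Claim_ definition above) =====
theorem solution_spec : Claim_equal_solution := by
  intro n m bb _
  unfold Spec_solution
  rw [A_split n m bb, B_eq n m bb]
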